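-- pv_equiv track=rewrite | github.com/Mateusz-Szewczyk/torch-ed | rag/src/chunking.py | _cleanup_chunks
-- ===== SOURCE A (Python) =====
-- from typing import List, Optional, Tuple
--
-- def _cleanup_chunks(chunks: List[str], min_size: int = 100) -> List[str]:
--     """Clean up chunks - remove too small ones, merge orphans."""
--     if not chunks:
--         return []
--
--     cleaned = []
--     pending_small = ""
--
--     for chunk in chunks:
--         chunk = chunk.strip()
--
--         if not chunk:
--             continue
--
--         # If chunk is too small, try to merge with next
--         if len(chunk) < min_size:
--             pending_small = (pending_small + "\n\n" + chunk).strip() if pending_small else chunk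
--             continue
--
--         # If we have pending small content, prepend it
--         if pending_small:
--             chunk = pending_small + "\n\n" + chunk
--             pending_small = ""
--
--         cleaned.append(chunk)
--
--     # Handle any remaining small content
--     if pending_small:
--         if cleaned:
--             cleaned[-1] = cleaned[-1] + "\n\n" + pending_small
--         else:
--             cleaned.append(pending_small)
--
--     return cleaned
-- ===== SOURCE B (Python) =====
-- from typing import List
--
--
-- def _cleanup_chunks(chunks: List[str], min_size: int = 100) -> List[str]:
--     """Clean up chunks - remove too small ones, merge orphans.
--
--     Different algorithmic decomposition: traverse the stripped chunks in
--     REVERSE.  Each large chunk opens a new group; smalls met afterwards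
--     (i.e. preceding it in the original order) are absorbed into the most
--     recently opened group, which is exactly 'smalls attach to the next
--     large chunk'.  Smalls met before any group exists are the trailing
--     run, glued onto the last result at the end.  Everything is joined once.
--     """
--     pieces = [s for s in (c.strip() for c in chunks) if s]
--     rev_groups: List[List[str]] = []  # groups in reverse order, members reversed
--     rev_trail: List[str] = []         # trailing smalls, reversed
--     for p in reversed(pieces):
--         if len(p) >= min_size:
--             rev_groups.append([p])
--         elif rev_groups:
--             rev_groups[-1].append(p)
--         else:
--             rev_trail.append(p)
--     result = ["\n\n".join(reversed(g)) for g in reversed(rev_groups)]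
--     if rev_trail:
--         tail = "\n\n".join(reversed(rev_trail))
--         if result:
--             result[-1] = result[-1] + "\n\n" + tail
--         else:
--             result = [tail]
--     return result
-- ===== Notes on version B (the rewrite author's own statement) =====
-- stated objective: faster
-- what changed: Replaces A's forward scan with a pending-small string buffer (re-concatenated and re-stripped at every small chunk and flushed into the next large one) by a reverse traversal in which each large chunk opens a group that absorbs the small chunks encountered after it in the walk (i.e. preceding it in the original order), leading smalls of the reversed walk form the trailing run, and each group is joined exactly once at the end.
import Mathlib
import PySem

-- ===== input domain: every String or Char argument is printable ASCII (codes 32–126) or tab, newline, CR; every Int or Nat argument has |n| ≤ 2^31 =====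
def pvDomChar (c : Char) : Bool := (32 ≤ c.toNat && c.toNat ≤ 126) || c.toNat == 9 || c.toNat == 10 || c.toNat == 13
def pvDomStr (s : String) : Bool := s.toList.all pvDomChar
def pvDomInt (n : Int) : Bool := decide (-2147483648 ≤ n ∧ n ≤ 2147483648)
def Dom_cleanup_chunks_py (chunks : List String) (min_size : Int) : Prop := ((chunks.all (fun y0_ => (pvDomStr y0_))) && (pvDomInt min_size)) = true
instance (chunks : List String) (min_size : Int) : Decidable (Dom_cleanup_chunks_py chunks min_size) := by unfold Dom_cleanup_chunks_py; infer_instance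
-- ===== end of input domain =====

-- B replaces A's forward scan with a pending-string buffer by a REVERSE traversal: each large
-- chunk opens a group that absorbs the small chunks preceding it, leading smalls of the reversed
-- walk are the trailing run, and every group is joined once (objective: faster).

-- ===== PORT A =====
-- loop body of A's for-loop: state = (cleaned, pending_small)
def pvAStep (min_size : Int) (st : List String × String) (chunk0 : String) : List String × String :=
  let chunk := PySem.Str.strip chunk0
  if chunk = "" then st
  else if PySem.Str.len chunk < min_size then
    (st.1, if st.2 ≠ "" then PySem.Str.strip (st.2 ++ "\n\n" ++ chunk) else chunk)
  else
    (st.1 ++ [if st.2 ≠ "" then st.2 ++ "\n\n" ++ chunk else chunk], "")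

def cleanup_chunks_py (chunks : List String) (min_size : Int) : List String :=
  if chunks = [] then []
  else
    let st := chunks.foldl (pvAStep min_size) ([], "")
    if st.2 ≠ "" then
      if st.1 ≠ [] then st.1.dropLast ++ [st.1.getLast! ++ "\n\n" ++ st.2]
      else st.1 ++ [st.2]
    else st.1

-- ===== PORT B =====
-- loop body of B's for-loop over reversed(pieces): state = (rev_groups, rev_trail)
def pvBStep (min_size : Int) (st : List (List String) × List String) (p : String) :
    List (List String) × List String :=
  if min_size ≤ PySem.Str.len p then (st.1 ++ [[p]], st.2)
  else if st.1 ≠ [] then (st.1.dropLast ++ [st.1.getLast! ++ [p]], st.2)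
  else (st.1, st.2 ++ [p])

def cleanup_chunks_py_alt (chunks : List String) (min_size : Int) : List String :=
  let pieces := (chunks.map PySem.Str.strip).filter (fun c => c ≠ "")
  let st := pieces.reverse.foldl (pvBStep min_size) ([], [])
  let result := st.1.reverse.map (fun g => PySem.Str.join "\n\n" g.reverse)
  if st.2 ≠ [] then
    let tail := PySem.Str.join "\n\n" st.2.reverse
    if result ≠ [] then result.dropLast ++ [result.getLast! ++ "\n\n" ++ tail]
    else [tail]
  else result

-- ===== PRECONDITION & SPEC =====
def Spec_cleanup_chunks_py (chunks : List String) (min_size : Int) (out : List String) : Prop := out = cleanup_chunks_py_alt chunks min_size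
instance (chunks : List String) (min_size : Int) (out : List String) : Decidable (Spec_cleanup_chunks_py chunks min_size out) := by unfold Spec_cleanup_chunks_py; infer_instance

-- ===== CLAIM (what is proved, stated in full; the proofs are below) =====
def Claim_equal_cleanup_chunks_py : Prop := ∀ (chunks : List String) (min_size : Int), Dom_cleanup_chunks_py chunks min_size → Spec_cleanup_chunks_py chunks min_size (cleanup_chunks_py chunks min_size)

-- ===== LEMMAS AND PROOFS =====

-- a char list with non-whitespace ends (and nonempty): strip leaves it unchanged
def pvGood (cs : List Char) : Prop :=
  cs ≠ [] ∧ (∀ c ∈ cs.head?, PySem.Chars.isspace c = false) ∧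
    (∀ c ∈ cs.getLast?, PySem.Chars.isspace c = false)

theorem pv_dropWhile_self (p : Char → Bool) (l : List Char)
    (h : ∀ c ∈ l.head?, p c = false) : l.dropWhile p = l := by
  cases l with
  | nil => rfl
  | cons a t => simp only [List.head?_cons, Option.mem_some_iff] at h
                simp [h a rfl]

theorem pv_strip_of_good (cs : List Char) (h : pvGood cs) : PySem.Chars.strip cs = cs := by
  obtain ⟨_, hh, hl⟩ := h
  simp only [PySem.Chars.strip, PySem.Chars.lstrip, PySem.Chars.rstrip]
  rw [pv_dropWhile_self _ _ hh, pv_dropWhile_self, List.reverse_reverse]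
  intro c hc
  rw [List.head?_reverse] at hc
  exact hl c hc

theorem pv_good_strip (cs : List Char) (h : PySem.Chars.strip cs ≠ []) :
    pvGood (PySem.Chars.strip cs) := by
  refine ⟨h, ?_, ?_⟩
  · -- head of strip: strip cs is a nonempty prefix of lstrip cs, whose head is non-space
    intro c hc
    have hls : PySem.Chars.lstrip cs ≠ [] := by
      intro hnil
      simp [PySem.Chars.strip, PySem.Chars.rstrip, hnil] at h
    have hpre : PySem.Chars.strip cs <+: PySem.Chars.lstrip cs := by
      have hsuf := List.dropWhile_suffix (l := (PySem.Chars.lstrip cs).reverse)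
        (p := PySem.Chars.isspace)
      have := List.reverse_prefix.mpr (by simpa using hsuf)
      simpa [PySem.Chars.strip, PySem.Chars.rstrip] using this
    have hhead : (PySem.Chars.strip cs).head? = (PySem.Chars.lstrip cs).head? := by
      obtain ⟨r, hr⟩ := hpre
      cases hst : PySem.Chars.strip cs with
      | nil => exact absurd hst h
      | cons a t => rw [← hr, hst]; simp
    rw [hhead] at hc
    cases hls' : PySem.Chars.lstrip cs with
    | nil => exact absurd hls' hls
    | cons a t =>
      rw [hls'] at hc
      simp only [List.head?_cons, Option.mem_some_iff] at hc
      subst hc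
      have h0 : 0 < (cs.dropWhile PySem.Chars.isspace).length := by
        simp [PySem.Chars.lstrip] at hls'
        simp [hls']
      have := List.dropWhile_get_zero_not PySem.Chars.isspace cs h0
      simp only [PySem.Chars.lstrip] at hls'
      simpa [hls'] using this
  · -- last of strip: reverse of strip is dropWhile …, whose head is non-space
    intro c hc
    rw [← List.head?_reverse] at hc
    have hrev : (PySem.Chars.strip cs).reverse
        = (PySem.Chars.lstrip cs).reverse.dropWhile PySem.Chars.isspace := by
      simp [PySem.Chars.strip, PySem.Chars.rstrip]
    rw [hrev] at hc
    have h0 : 0 < ((PySem.Chars.lstrip cs).reverse.dropWhile PySem.Chars.isspace).length := by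
      rcases hd : (PySem.Chars.lstrip cs).reverse.dropWhile PySem.Chars.isspace with _ | _
      · rw [← hrev] at hd; simp at hd; exact absurd hd h
      · simp
    have := List.dropWhile_get_zero_not PySem.Chars.isspace
      ((PySem.Chars.lstrip cs).reverse) h0
    rcases hd : (PySem.Chars.lstrip cs).reverse.dropWhile PySem.Chars.isspace with _ | ⟨a, t⟩
    · rw [hd] at hc; simp at hc
    · rw [hd] at hc
      simp only [List.head?_cons, Option.mem_some_iff] at hc
      subst hc
      simpa [hd] using this

theorem pv_good_append (a m b : List Char) (ha : pvGood a) (hb : pvGood b) :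
    pvGood (a ++ m ++ b) := by
  obtain ⟨ha0, hah, _⟩ := ha
  obtain ⟨hb0, _, hbl⟩ := hb
  refine ⟨by simp [ha0], ?_, ?_⟩
  · rw [List.append_assoc, List.head?_append_of_ne_nil _ ha0]; exact hah
  · rw [List.getLast?_append_of_ne_nil _ hb0]; exact hbl

theorem pv_join_append (sep : List Char) (xs ys : List (List Char))
    (hx : xs ≠ []) (hy : ys ≠ []) :
    PySem.Chars.join sep (xs ++ ys)
      = PySem.Chars.join sep xs ++ sep ++ PySem.Chars.join sep ys := by
  induction xs with
  | nil => exact absurd rfl hx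
  | cons a t ih =>
    cases t with
    | nil =>
      cases ys with
      | nil => exact absurd rfl hy
      | cons c u => simp [PySem.Chars.join_singleton, PySem.Chars.join_cons_cons]
    | cons b t' =>
      rw [show (a :: b :: t') ++ ys = a :: b :: (t' ++ ys) from rfl,
          PySem.Chars.join_cons_cons,
          show (b :: (t' ++ ys) : List (List Char)) = (b :: t') ++ ys from rfl,
          ih (by simp), PySem.Chars.join_cons_cons]
      simp [List.append_assoc]

-- String-level corollaries
theorem pv_sjoin_nil : PySem.Str.join "\n\n" [] = "" := by
  apply String.toList_inj.mp
  simp [PySem.Str.toList_join, PySem.Chars.join_nil]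

theorem pv_sjoin_singleton (p : String) : PySem.Str.join "\n\n" [p] = p := by
  apply String.toList_inj.mp
  simp [PySem.Str.toList_join, PySem.Chars.join_singleton]

theorem pv_sjoin_append (xs ys : List String) (hx : xs ≠ []) (hy : ys ≠ []) :
    PySem.Str.join "\n\n" (xs ++ ys)
      = PySem.Str.join "\n\n" xs ++ "\n\n" ++ PySem.Str.join "\n\n" ys := by
  apply String.toList_inj.mp
  simp only [PySem.Str.toList_join, String.toList_append, List.map_append]
  rw [pv_join_append _ _ _ (by simpa using hx) (by simpa using hy)]

-- PROOF-SIDE reference scan (forward grouping fold, used only to relate the two ports)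
def pvOldStep (min_size : Int) (st : List (List String) × List String) (p : String) :
    List (List String) × List String :=
  if min_size ≤ PySem.Str.len p then (st.1 ++ [st.2 ++ [p]], [])
  else (st.1, st.2 ++ [p])

-- head-recursive characterization: (groups in order, trailing small run)
def pvAsm (min_size : Int) : List String → List (List String) × List String
  | [] => ([], [])
  | p :: t =>
    let st := pvAsm min_size t
    if min_size ≤ PySem.Str.len p then ([p] :: st.1, st.2)
    else
      match st.1 with
      | [] => ([], p :: st.2)
      | g :: gs => ((p :: g) :: gs, st.2)

theorem pv_foldl_old_general (m : Int) (l : List String)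
    (G : List (List String)) (R : List String) :
    l.foldl (pvOldStep m) (G, R) =
      match pvAsm m l with
      | ([], T) => (G, R ++ T)
      | (g :: gs, T) => (G ++ (R ++ g) :: gs, T) := by
  induction l generalizing G R with
  | nil => simp [pvAsm]
  | cons p t ih =>
    simp only [List.foldl_cons, pvOldStep, pvAsm]
    by_cases hp : m ≤ PySem.Str.len p
    · have hp' : m ≤ (p.length : Int) := by simpa [PySem.Str.len] using hp
      rw [if_pos hp]
      rw [ih]
      rcases h : pvAsm m t with ⟨G', T'⟩
      cases G' with
      | nil => simp [hp']
      | cons g gs => simp [hp']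
    · have hp' : ¬ m ≤ (p.length : Int) := by simpa [PySem.Str.len] using hp
      rw [if_neg hp]
      rw [ih]
      rcases h : pvAsm m t with ⟨G', T'⟩
      cases G' with
      | nil => simp [hp']
      | cons g gs => simp [hp']

theorem pv_foldl_old (m : Int) (l : List String) :
    l.foldl (pvOldStep m) ([], []) = pvAsm m l := by
  rw [pv_foldl_old_general]
  rcases h : pvAsm m l with ⟨G, T⟩
  cases G with
  | nil => simp
  | cons g gs => simp

-- B's reverse fold, characterized by pvAsm
theorem pv_foldr_new (m : Int) (l : List String) :
    l.reverse.foldl (pvBStep m) ([], []) =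
      (((pvAsm m l).1.map List.reverse).reverse, (pvAsm m l).2.reverse) := by
  rw [List.foldl_reverse]
  induction l with
  | nil => simp [pvAsm]
  | cons p t ih =>
    rw [List.foldr_cons, ih]
    rcases h : pvAsm m t with ⟨G', T'⟩
    by_cases hp : m ≤ PySem.Str.len p
    · have hp' : m ≤ (p.length : Int) := by simpa [PySem.Str.len] using hp
      simp [pvAsm, pvBStep, h, hp']
    · have hp' : ¬ m ≤ (p.length : Int) := by simpa [PySem.Str.len] using hp
      cases G' with
      | nil => simp [pvAsm, pvBStep, h, hp']
      | cons g gs =>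
        simp only [pvBStep]
        rw [if_neg hp]
        have hne : ((List.map List.reverse (g :: gs)).reverse : List (List String)) ≠ [] := by
          simp
        rw [if_pos hne]
        simp only [pvAsm, h, List.map_cons, List.reverse_cons]
        rw [List.dropLast_concat, List.getLast!_eq_getLast?_getD, List.getLast?_concat]
        simp [hp']

-- the invariant tying A's loop state to the reference fold's state
def pvInv (stA : List String × String) (stB : List (List String) × List String) : Prop :=
  stA.1 = stB.1.map (fun g => PySem.Str.join "\n\n" g) ∧
  stA.2 = PySem.Str.join "\n\n" stB.2 ∧
  (stB.2 ≠ [] → pvGood stA.2.toList) ∧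
  (∀ g ∈ stB.1, g ≠ [])

-- A's loop body, specialized to an already-stripped nonempty chunk
def pvACore (min_size : Int) (st : List String × String) (chunk : String) : List String × String :=
  if PySem.Str.len chunk < min_size then
    (st.1, if st.2 ≠ "" then PySem.Str.strip (st.2 ++ "\n\n" ++ chunk) else chunk)
  else
    (st.1 ++ [if st.2 ≠ "" then st.2 ++ "\n\n" ++ chunk else chunk], "")

theorem pv_astep_eq (m : Int) (st : List String × String) (c : String) :
    pvAStep m st c = if PySem.Str.strip c = "" then st else pvACore m st (PySem.Str.strip c) := by
  simp only [pvAStep, pvACore]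

theorem pv_foldl_astep (m : Int) (chunks : List String) (st : List String × String) :
    chunks.foldl (pvAStep m) st
      = ((chunks.map PySem.Str.strip).filter (fun c => c ≠ "")).foldl (pvACore m) st := by
  induction chunks generalizing st with
  | nil => rfl
  | cons c t ih =>
    simp only [List.foldl_cons, List.map_cons, List.filter_cons]
    by_cases hc : PySem.Str.strip c = ""
    · simp [hc, pv_astep_eq, ih]
    · simp [hc, pv_astep_eq, ih]

theorem pv_pdne (pd : String) (run : List String)
    (hpd : pd = PySem.Str.join "\n\n" run) (hgood : run ≠ [] → pvGood pd.toList) :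
    pd ≠ "" ↔ run ≠ [] := by
  constructor
  · intro h hB
    rw [hpd, hB, pv_sjoin_nil] at h; exact h rfl
  · intro hB h
    have := (hgood hB).1
    rw [h] at this; exact this rfl

-- one step preserves the invariant
theorem pv_step (m : Int) (stA : List String × String) (stB : List (List String) × List String)
    (p : String) (hp : pvGood p.toList) (hinv : pvInv stA stB) :
    pvInv (pvACore m stA p) (pvOldStep m stB p) := by
  obtain ⟨hcl, hpd, hgood, hg⟩ := hinv
  have hpdne : stA.2 ≠ "" ↔ stB.2 ≠ [] := pv_pdne _ _ hpd hgood
  by_cases hsmall : PySem.Str.len p < m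
  · -- small chunk: A extends pending, reference fold extends run
    have hnotBig : ¬ m ≤ PySem.Str.len p := by omega
    have hA : pvACore m stA p
        = (stA.1, if stA.2 ≠ "" then PySem.Str.strip (stA.2 ++ "\n\n" ++ p) else p) := by
      unfold pvACore; rw [if_pos hsmall]
    have hB : pvOldStep m stB p = (stB.1, stB.2 ++ [p]) := by
      unfold pvOldStep; rw [if_neg hnotBig]
    rw [hA, hB]
    have hpd' : (if stA.2 ≠ "" then PySem.Str.strip (stA.2 ++ "\n\n" ++ p) else p)
        = PySem.Str.join "\n\n" (stB.2 ++ [p]) ∧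
        pvGood (if stA.2 ≠ "" then PySem.Str.strip (stA.2 ++ "\n\n" ++ p) else p).toList := by
      by_cases hrun : stB.2 = []
      · have hpd0 : ¬ stA.2 ≠ "" := fun h => (hpdne.mp h) hrun
        rw [if_neg hpd0, hrun]
        exact ⟨(pv_sjoin_singleton p).symm, hp⟩
      · have hpd1 : stA.2 ≠ "" := hpdne.mpr hrun
        have hgoodpd := hgood hrun
        have hcat : pvGood (stA.2 ++ "\n\n" ++ p).toList := by
          have := pv_good_append stA.2.toList "\n\n".toList p.toList hgoodpd hp
          simpa using this
        have hstrip : PySem.Str.strip (stA.2 ++ "\n\n" ++ p) = stA.2 ++ "\n\n" ++ p := by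
          apply String.toList_inj.mp
          rw [PySem.Str.toList_strip, pv_strip_of_good _ hcat]
        rw [if_pos hpd1, hstrip]
        refine ⟨?_, hcat⟩
        rw [pv_sjoin_append stB.2 [p] hrun (by simp), pv_sjoin_singleton, hpd]
    exact ⟨hcl, hpd'.1, fun _ => hpd'.2, hg⟩
  · -- large chunk: A flushes pending into a new cleaned entry, the fold closes the group
    have hbig : m ≤ PySem.Str.len p := by omega
    have hA : pvACore m stA p
        = (stA.1 ++ [if stA.2 ≠ "" then stA.2 ++ "\n\n" ++ p else p], "") := by
      unfold pvACore; rw [if_neg hsmall]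
    have hB : pvOldStep m stB p = (stB.1 ++ [stB.2 ++ [p]], []) := by
      unfold pvOldStep; rw [if_pos hbig]
    rw [hA, hB]
    have hjoin : (if stA.2 ≠ "" then stA.2 ++ "\n\n" ++ p else p)
        = PySem.Str.join "\n\n" (stB.2 ++ [p]) := by
      by_cases hrun : stB.2 = []
      · have hpd0 : ¬ stA.2 ≠ "" := fun h => (hpdne.mp h) hrun
        rw [if_neg hpd0, hrun]
        exact (pv_sjoin_singleton p).symm
      · have hpd1 : stA.2 ≠ "" := hpdne.mpr hrun
        rw [if_pos hpd1, pv_sjoin_append stB.2 [p] hrun (by simp), pv_sjoin_singleton, hpd]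
    refine ⟨?_, (pv_sjoin_nil).symm, fun h => absurd rfl h, ?_⟩
    · dsimp only
      rw [hcl, hjoin]
      simp
    · intro g hgmem
      rcases List.mem_append.mp hgmem with h | h
      · exact hg g h
      · rw [List.mem_singleton.mp h]; simp

theorem pv_loop (m : Int) (ps : List String) (hps : ∀ p ∈ ps, pvGood p.toList)
    (stA : List String × String) (stB : List (List String) × List String)
    (hinv : pvInv stA stB) :
    pvInv (ps.foldl (pvACore m) stA) (ps.foldl (pvOldStep m) stB) := by
  induction ps generalizing stA stB with
  | nil => exact hinv
  | cons p t ih =>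
    simp only [List.foldl_cons]
    exact ih (fun q hq => hps q (List.mem_cons_of_mem _ hq)) _ _
      (pv_step m stA stB p (hps p (List.mem_cons_self)) hinv)

-- ===== VERDICT (by name: the statement is the Claim_ definition above) =====
theorem cleanup_chunks_py_spec : Claim_equal_cleanup_chunks_py := by
  intro chunks min_size _
  unfold Spec_cleanup_chunks_py
  by_cases h0 : chunks = []
  · subst h0; rfl
  · set pieces := (chunks.map PySem.Str.strip).filter (fun c => c ≠ "") with hpieces
    set stA := pieces.foldl (pvACore min_size) ([], "") with hstA
    have hps : ∀ p ∈ pieces, pvGood p.toList := by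
      intro p hp
      rw [hpieces] at hp
      simp only [List.mem_filter, List.mem_map, decide_eq_true_eq] at hp
      obtain ⟨⟨c, _, rfl⟩, hne⟩ := hp
      have : (PySem.Str.strip c).toList ≠ [] := by
        intro h; exact hne (String.toList_eq_nil_iff.mp h)
      rw [PySem.Str.toList_strip] at this ⊢
      exact pv_good_strip _ this
    obtain ⟨hcl, hpd, hgood, _⟩ :=
      pv_loop min_size pieces hps ([], "") ([], [])
        ⟨by simp, by simp [pv_sjoin_nil], by simp, by simp⟩
    rw [← hstA] at hcl hpd hgood
    rw [pv_foldl_old] at hcl hpd hgood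
    -- A's output in terms of stA
    have ha : cleanup_chunks_py chunks min_size
        = if stA.2 ≠ "" then
            (if stA.1 ≠ [] then stA.1.dropLast ++ [stA.1.getLast! ++ "\n\n" ++ stA.2]
             else stA.1 ++ [stA.2])
          else stA.1 := by
      unfold cleanup_chunks_py
      rw [if_neg h0, pv_foldl_astep, ← hpieces, ← hstA]
    -- B's output in terms of pvAsm
    rcases hasm : pvAsm min_size pieces with ⟨G, T⟩
    have hb : cleanup_chunks_py_alt chunks min_size
        = (if T ≠ [] then
            (if G.map (fun g => PySem.Str.join "\n\n" g) ≠ [] then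
              (G.map (fun g => PySem.Str.join "\n\n" g)).dropLast
                ++ [(G.map (fun g => PySem.Str.join "\n\n" g)).getLast!
                      ++ "\n\n" ++ PySem.Str.join "\n\n" T]
             else [PySem.Str.join "\n\n" T])
          else G.map (fun g => PySem.Str.join "\n\n" g)) := by
      simp only [cleanup_chunks_py_alt]
      rw [pv_foldr_new]
      rw [← hpieces, hasm]
      simp only [List.reverse_reverse, List.map_map]
      by_cases hT : T = []
      · simp [hT, Function.comp]
      · have hTr : (T.reverse : List String) ≠ [] := by simpa using hT
        rw [if_pos hTr]
        by_cases hG : G = []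
        · simp [hG, hT]
        · have hGm : (List.map ((fun g => PySem.Str.join "\n\n" g.reverse) ∘ List.reverse) G
              : List String) ≠ [] := by simp [hG]
          rw [if_pos hGm, if_pos (show (List.map (fun g => PySem.Str.join "\n\n" g) G
              : List String) ≠ [] from by simpa using hG)]
          have hcomp : ((fun g => PySem.Str.join "\n\n" g.reverse) ∘ List.reverse :
              List String → String) = fun g => PySem.Str.join "\n\n" g := by
            funext g; simp [Function.comp]
          simp [hcomp, hT]
    rw [ha, hb]
    rw [hasm] at hcl hpd hgood
    dsimp only at hcl hpd hgood
    have hpdne : stA.2 ≠ "" ↔ T ≠ [] := pv_pdne _ _ hpd hgood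
    by_cases hT : T = []
    · have hpd0 : ¬ stA.2 ≠ "" := fun h => (hpdne.mp h) hT
      rw [if_neg hpd0, if_neg (show ¬ T ≠ [] from fun h => h hT), hcl]
    · have hpd1 : stA.2 ≠ "" := hpdne.mpr hT
      rw [if_pos hpd1, if_pos hT]
      by_cases hG : G = []
      · have h1 : ¬ stA.1 ≠ [] := by rw [hcl, hG]; simp
        rw [if_neg h1, if_neg (show ¬ (G.map (fun g => PySem.Str.join "\n\n" g)
              : List String) ≠ [] from by simp [hG]), hcl, hG, hpd]
        simp
      · have hGm : (G.map (fun g => PySem.Str.join "\n\n" g) : List String) ≠ [] := by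
          simpa using hG
        have h1 : stA.1 ≠ [] := by rw [hcl]; exact hGm
        rw [if_pos h1, if_pos hGm, hcl, hpd]
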